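-- pv_equiv track=rewrite | github.com/sarikiras/matrice-word-searches | reconstitution.py | join_grid_sup
-- ===== SOURCE A (Python) =====
-- def join_grid_sup(split_grid_sup):
--     n = len(split_grid_sup) + 1
--     new_grid = []
--     for i in range(n):
--         ligne = []
--         for _ in range(i+1):
--             ligne.append('0')
--         for k in range(n-1-i):
--             ligne.append(split_grid_sup[k][i])
--         new_grid.append(ligne)
--     return new_grid
-- ===== SOURCE B (Python) =====
-- def join_grid_sup(split_grid_sup):
--     n = len(split_grid_sup) + 1
--     grid = [['0'] * n for _ in range(n)]
--     for k in range(n - 1):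
--         for i in range(n - 1 - k):
--             grid[i][i + 1 + k] = split_grid_sup[k][i]
--     return grid
-- ===== Notes on version B (the rewrite author's own statement) =====
-- stated objective: alternative
-- what changed: B preallocates an all-'0' n x n grid and then scatters the split values diagonally, iterating by split index k and writing grid[i][i+1+k] in place, instead of A's row-by-row construction that builds each row by appending zeros and then gathering from every sublist.
import Mathlib
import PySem

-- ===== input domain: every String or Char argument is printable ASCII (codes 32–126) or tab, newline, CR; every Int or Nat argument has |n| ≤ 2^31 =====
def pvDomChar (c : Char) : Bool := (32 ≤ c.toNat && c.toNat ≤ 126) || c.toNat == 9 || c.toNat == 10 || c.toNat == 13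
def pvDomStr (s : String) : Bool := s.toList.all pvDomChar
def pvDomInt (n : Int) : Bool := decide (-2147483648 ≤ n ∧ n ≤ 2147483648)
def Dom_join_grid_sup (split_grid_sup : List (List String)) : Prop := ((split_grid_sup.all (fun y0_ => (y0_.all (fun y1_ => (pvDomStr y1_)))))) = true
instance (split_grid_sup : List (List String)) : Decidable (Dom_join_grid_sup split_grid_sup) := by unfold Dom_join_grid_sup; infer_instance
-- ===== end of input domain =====

-- B preallocates an all-'0' n×n grid and scatters the split values diagonally (by split index k),
-- writing cells in place, instead of A's row-by-row append construction (objective: alternative).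

-- ===== PORT A =====
-- split_grid_sup[k][i] is ported as nested List.getD; under Pre_ both indices are in range, so the
-- defaults are never reached (Python raises IndexError exactly on the inputs Pre_ excludes).
def join_grid_sup (split_grid_sup : List (List String)) : List (List String) :=
  let n := split_grid_sup.length + 1
  (List.range n).foldl (fun new_grid i =>
    let ligne : List String := (List.range (i+1)).foldl (fun l _ => l ++ ["0"]) []
    let ligne := (List.range (n-1-i)).foldl
      (fun l k => l ++ [(split_grid_sup.getD k []).getD i ""]) ligne
    new_grid ++ [ligne]) []

-- ===== PORT B =====
-- grid[i][i+1+k] = split_grid_sup[k][i] is ported as List.modify of row i with List.set;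
-- under Pre_ the read indices are in range (same reads as A), so the defaults are never reached.
def join_grid_sup_alt (split_grid_sup : List (List String)) : List (List String) :=
  let n := split_grid_sup.length + 1
  let grid := (List.range n).map (fun _ => List.replicate n "0")
  (List.range (n-1)).foldl (fun g k =>
    (List.range (n-1-k)).foldl (fun g i =>
      g.modify i (fun row => row.set (i+1+k) ((split_grid_sup.getD k []).getD i ""))) g) grid

-- ===== PRECONDITION & SPEC =====
-- Pre_ holds exactly when every sublist k is long enough for the reads split_grid_sup[k][i]
-- (i < n-1-k) both Pythons perform; on shorter sublists both raise IndexError.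
def Pre_join_grid_sup (split_grid_sup : List (List String)) : Prop :=
  ∀ k < split_grid_sup.length, split_grid_sup.length - k ≤ (split_grid_sup.getD k []).length
instance (split_grid_sup : List (List String)) : Decidable (Pre_join_grid_sup split_grid_sup) := by unfold Pre_join_grid_sup; infer_instance
def pvWitness_join_grid_sup : List (List String) := [["a", "b"], ["c"]]

def Spec_join_grid_sup (split_grid_sup : List (List String)) (out : List (List String)) : Prop := out = join_grid_sup_alt split_grid_sup
instance (split_grid_sup : List (List String)) (out : List (List String)) : Decidable (Spec_join_grid_sup split_grid_sup out) := by unfold Spec_join_grid_sup; infer_instance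

-- ===== CLAIM (what is proved, stated in full; the proofs are below) =====
def Claim_equal_join_grid_sup : Prop := ∀ (split_grid_sup : List (List String)), Dom_join_grid_sup split_grid_sup → Pre_join_grid_sup split_grid_sup → Spec_join_grid_sup split_grid_sup (join_grid_sup split_grid_sup)

-- ===== LEMMAS AND PROOFS =====

-- the value written/read at split index k, row i
def pvW (s : List (List String)) (k i : Nat) : String := (s.getD k []).getD i ""

-- state of B's grid: after outer passes 0..m-1 fully and, in pass m, inner writes 0..t-1
def pvCell (s : List (List String)) (m t i j : Nat) : String :=
  if (i < j ∧ j - i - 1 < m) ∨ (i < t ∧ j = i + 1 + m) then pvW s (j - i - 1) i else "0"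

def pvGrid (s : List (List String)) (n m t : Nat) : List (List String) :=
  (List.range n).map (fun i => (List.range n).map (pvCell s m t i))

-- A's append-accumulator loops are map in disguise.
theorem pv_foldl_app_singleton {α β : Type} (f : β → α) :
    ∀ (xs : List β) (l : List α),
      xs.foldl (fun acc x => acc ++ [f x]) l = l ++ xs.map f := by
  intro xs
  induction xs with
  | nil => simp
  | cons x xs ih => intro l; simp [List.foldl_cons, ih]

-- A's row i equals row i of the fully scattered grid.
theorem pv_row_eq (s : List (List String)) (i : Nat) (hi : i < s.length + 1) :
    List.replicate (i+1) "0" ++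
      (List.range (s.length + 1 - 1 - i)).map (fun k => pvW s k i) =
    (List.range (s.length + 1)).map (pvCell s s.length 0 i) := by
  apply List.ext_getElem
  · simp; omega
  · intro j hj₁ hj₂
    simp only [List.getElem_map, List.getElem_range]
    by_cases hji : j ≤ i
    · rw [List.getElem_append_left (by simpa using by omega)]
      simp only [List.getElem_replicate, pvCell]
      rw [if_neg (by omega)]
    · have hlen : (List.replicate (i+1) "0").length ≤ j := by simp; omega
      rw [List.getElem_append_right hlen]
      simp only [List.length_replicate, List.getElem_map, List.getElem_range, pvCell]
      have hj : j < s.length + 1 := by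
        have := hj₁; simp at this; omega
      rw [if_pos (Or.inl ⟨by omega, by omega⟩)]
      congr 1

-- one inner write advances t by one
theorem pv_inner_step (s : List (List String)) (n m t : Nat) (_ht : t + m + 2 ≤ n) :
    (pvGrid s n m t).modify t (fun row => row.set (t+1+m) (pvW s m t)) =
      pvGrid s n m (t+1) := by
  apply List.ext_getElem
  · simp [pvGrid]
  · intro i hi₁ hi₂
    have hi : i < n := by simpa [pvGrid] using hi₂
    rw [List.getElem_modify]
    simp only [pvGrid, List.getElem_map, List.getElem_range]
    by_cases hit : t = i
    · subst hit
      rw [if_pos rfl]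
      apply List.ext_getElem
      · simp
      · intro j hj₁ hj₂
        have hj : j < n := by simpa using hj₂
        rw [List.getElem_set]
        simp only [List.getElem_map, List.getElem_range, pvCell]
        by_cases hje : t + 1 + m = j
        · rw [if_pos hje, if_pos (Or.inr ⟨by omega, by omega⟩)]
          have : j - t - 1 = m := by omega
          rw [this]
        · rw [if_neg hje]
          by_cases h1 : (t < j ∧ j - t - 1 < m) ∨ (t < t ∧ j = t + 1 + m)
          · rw [if_pos h1, if_pos (by omega)]
          · rw [if_neg h1, if_neg (by omega)]
    · rw [if_neg hit]
      congr 1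
      funext j
      simp only [pvCell]
      by_cases h1 : (i < j ∧ j - i - 1 < m) ∨ (i < t ∧ j = i + 1 + m)
      · rw [if_pos h1, if_pos (by omega)]
      · rw [if_neg h1, if_neg (by omega)]

-- the inner loop of pass m scatters rows 0..t-1
theorem pv_inner_eq (s : List (List String)) (n m : Nat) :
    ∀ t, t + m + 1 ≤ n →
    (List.range t).foldl (fun g i =>
        g.modify i (fun row => row.set (i+1+m) (pvW s m i))) (pvGrid s n m 0) =
      pvGrid s n m t := by
  intro t
  induction t with
  | zero => intro _; rfl
  | succ t ih =>
    intro ht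
    rw [List.range_succ, List.foldl_append, ih (by omega)]
    simpa using pv_inner_step s n m t (by omega)

-- finishing pass m turns the grid into the start state of pass m+1
theorem pv_pass_done (s : List (List String)) (n m : Nat) (hm : m < n) :
    pvGrid s n m (n - 1 - m) = pvGrid s n (m+1) 0 := by
  unfold pvGrid
  apply List.map_congr_left
  intro i hi
  apply List.map_congr_left
  intro j hj
  have hi' : i < n := List.mem_range.mp hi
  have hj' : j < n := List.mem_range.mp hj
  simp only [pvCell]
  by_cases h1 : (i < j ∧ j - i - 1 < m) ∨ (i < n - 1 - m ∧ j = i + 1 + m)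
  · rw [if_pos h1, if_pos (by omega)]
  · rw [if_neg h1, if_neg (by omega)]

-- the outer loop over k = 0..m-1
theorem pv_outer_eq (s : List (List String)) :
    ∀ m, m ≤ s.length →
    (List.range m).foldl (fun g k =>
        (List.range (s.length + 1 - 1 - k)).foldl (fun g i =>
          g.modify i (fun row => row.set (i+1+k) (pvW s k i))) g)
      ((List.range (s.length + 1)).map (fun _ => List.replicate (s.length + 1) "0")) =
      pvGrid s (s.length + 1) m 0 := by
  intro m
  induction m with
  | zero =>
    intro _
    simp only [List.range_zero, List.foldl_nil, pvGrid]
    apply List.map_congr_left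
    intro i _
    apply List.ext_getElem
    · simp
    · intro j hj₁ hj₂
      simp only [List.getElem_replicate, List.getElem_map, List.getElem_range, pvCell]
      rw [if_neg (by omega)]
  | succ m ih =>
    intro hm
    rw [show List.range (m+1) = List.range m ++ [m] from List.range_succ,
        List.foldl_append, ih (by omega)]
    simp only [List.foldl_cons, List.foldl_nil]
    rw [show s.length + 1 - 1 - m = ((s.length + 1) - 1 - m) by rfl]
    rw [pv_inner_eq s (s.length + 1) m (s.length + 1 - 1 - m) (by omega)]
    exact pv_pass_done s (s.length + 1) m (by omega)

-- ===== VERDICT (by name: the statement is the Claim_ definition above) =====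
theorem join_grid_sup_spec : Claim_equal_join_grid_sup := by
  intro s _ _
  show join_grid_sup s = join_grid_sup_alt s
  unfold join_grid_sup join_grid_sup_alt
  simp only
  rw [show List.range (s.length + 1 - 1) = List.range s.length by norm_num]
  have hout := pv_outer_eq s s.length (le_refl _)
  simp only [pvW] at hout
  rw [hout]
  simp only [pv_foldl_app_singleton, List.nil_append]
  unfold pvGrid
  apply List.map_congr_left
  intro i hi
  have hi' : i < s.length + 1 := List.mem_range.mp hi
  have h0 : (List.range (i+1)).map (fun _ : Nat => "0") = List.replicate (i+1) "0" := by
    simp [List.map_const']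
  rw [h0]
  have hrow := pv_row_eq s i hi'
  simp only [pvW] at hrow
  exact hrow
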